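-- pv_equiv track=rewrite | github.com/S3nna13/Aurelius | src/ui/aurelius_shell.py | _parse_skill_markdown
-- ===== SOURCE A (Python) =====
-- def _parse_skill_markdown(text: str, skill_id: str) -> tuple[str, str]:
--     title = ""
--     summary_lines: list[str] = []
--     in_summary = False
--     for raw_line in text.splitlines():
--         line = raw_line.strip()
--         if not line:
--             if in_summary:
--                 break
--             continue
--         if not title and line.startswith("#"):
--             title = line.lstrip("#").strip()
--             continue
--         if title and not in_summary:
--             in_summary = True
--             summary_lines.append(line)
--         elif in_summary:
--             summary_lines.append(line)
--     if not title:
--         title = skill_id.replace("/", " ").replace("-", " ").title()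
--     summary = " ".join(summary_lines).strip()
--     return title, summary
-- ===== SOURCE B (Python) =====
-- def _parse_skill_markdown(text: str, skill_id: str) -> tuple[str, str]:
--     # Phase 1: group stripped lines into blank-separated paragraphs.
--     paragraphs: list[list[str]] = []
--     current: list[str] = []
--     for raw in text.splitlines():
--         line = raw.strip()
--         if line:
--             current.append(line)
--         elif current:
--             paragraphs.append(current)
--             current = []
--     if current:
--         paragraphs.append(current)
--     # Phase 2: find the first heading line in the paragraph structure.
--     for p, para in enumerate(paragraphs):
--         for j, line in enumerate(para):
--             if line.startswith("#"):
--                 title = line.lstrip("#").strip()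
--                 if title:
--                     tail = para[j + 1:]
--                     if tail:
--                         return title, " ".join(tail)
--                     if p + 1 < len(paragraphs):
--                         return title, " ".join(paragraphs[p + 1])
--                     return title, ""
--     return skill_id.replace("/", " ").replace("-", " ").title(), ""
-- ===== Notes on version B (the rewrite author's own statement) =====
-- stated objective: alternative
-- what changed: Replaces A's single-pass in_summary state machine with a paragraph data structure: one pass groups stripped lines into blank-separated paragraphs, then a search over that structure finds the first heading and takes the rest of its paragraph (or the next paragraph) as the summary.
import Mathlib
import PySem

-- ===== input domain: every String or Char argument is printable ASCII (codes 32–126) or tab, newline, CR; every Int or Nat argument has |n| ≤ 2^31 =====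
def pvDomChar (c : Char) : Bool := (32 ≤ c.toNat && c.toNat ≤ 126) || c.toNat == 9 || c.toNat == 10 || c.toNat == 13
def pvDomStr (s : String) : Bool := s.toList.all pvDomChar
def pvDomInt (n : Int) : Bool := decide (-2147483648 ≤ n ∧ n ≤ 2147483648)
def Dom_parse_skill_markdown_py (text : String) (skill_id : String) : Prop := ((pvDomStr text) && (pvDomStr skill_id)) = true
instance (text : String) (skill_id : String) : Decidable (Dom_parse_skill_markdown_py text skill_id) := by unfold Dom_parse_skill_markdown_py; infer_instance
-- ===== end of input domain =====

-- B replaces A's in_summary state-machine flag by a paragraph decomposition (group stripped lines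
-- into blank-separated paragraphs, then search that structure for the title and take the rest of
-- its paragraph, or the next paragraph, as summary); same return value, similar cost (alternative).


-- shared library-call helpers: Python's str.lstrip('#') and str.title() (exact on ASCII,
-- where the cased characters are exactly the letters)
def pvLstripHash (s : String) : String := String.ofList (s.toList.dropWhile (· == '#'))

def pvTitleAux : List Char → Bool → List Char
  | [], _ => []
  | c :: cs, prevCased =>
    if PySem.Chars.isalpha c then
      (if prevCased then PySem.Chars.lowerChar c else PySem.Chars.upperChar c) :: pvTitleAux cs true
    else c :: pvTitleAux cs false

def pvTitle (s : String) : String := String.ofList (pvTitleAux s.toList false)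

-- ===== PORT A =====
-- A's loop: state (title, summary_lines, in_summary); returns (title, summary_lines) at break/end
def pvALoop : List String → String → List String → Bool → String × List String
  | [], title, acc, _ => (title, acc)
  | raw :: rest, title, acc, inSum =>
    let line := PySem.Str.strip raw
    if line = "" then
      if inSum then (title, acc) else pvALoop rest title acc inSum
    else if title = "" ∧ PySem.Str.startswith line "#" then
      pvALoop rest (PySem.Str.strip (pvLstripHash line)) acc inSum
    else if title ≠ "" ∧ inSum = false then
      pvALoop rest title (acc ++ [line]) true
    else if inSum then
      pvALoop rest title (acc ++ [line]) inSum
    else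
      pvALoop rest title acc inSum

def parse_skill_markdown_py (text : String) (skill_id : String) : String × String :=
  let r := pvALoop (PySem.Str.splitlines text) "" [] false
  let title := if r.1 = "" then pvTitle (PySem.Str.replace (PySem.Str.replace skill_id "/" " ") "-" " ") else r.1
  (title, PySem.Str.strip (PySem.Str.join " " r.2))

-- ===== PORT B =====
-- B phase 1: group the stripped lines into blank-separated paragraphs (state: paragraphs, current)
def pvGroupLoop : List String → List (List String) → List String → List (List String)
  | [], paras, cur => if cur = [] then paras else paras ++ [cur]
  | raw :: rest, paras, cur =>
    let line := PySem.Str.strip raw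
    if line ≠ "" then pvGroupLoop rest paras (cur ++ [line])
    else if cur ≠ [] then pvGroupLoop rest (paras ++ [cur]) []
    else pvGroupLoop rest paras cur

-- B phase 2 inner loop: first heading line of one paragraph (title, lines after it), if any
def pvSearchPara : List String → Option (String × List String)
  | [] => none
  | line :: rest =>
    if PySem.Str.startswith line "#" then
      let t := PySem.Str.strip (pvLstripHash line)
      if t ≠ "" then some (t, rest) else pvSearchPara rest
    else pvSearchPara rest

-- B phase 2 outer loop over the paragraphs (early return ported as Option)
def pvSearchParas : List (List String) → Option (String × String)
  | [] => none
  | para :: rest =>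
    match pvSearchPara para with
    | some (t, tail) =>
      if tail ≠ [] then some (t, PySem.Str.join " " tail)
      else match rest with
        | next :: _ => some (t, PySem.Str.join " " next)
        | [] => some (t, "")
    | none => pvSearchParas rest

def parse_skill_markdown_py_alt (text : String) (skill_id : String) : String × String :=
  match pvSearchParas (pvGroupLoop (PySem.Str.splitlines text) [] []) with
  | some (t, s) => (t, s)
  | none => (pvTitle (PySem.Str.replace (PySem.Str.replace skill_id "/" " ") "-" " "), "")

-- ===== PRECONDITION & SPEC =====
def Spec_parse_skill_markdown_py (text : String) (skill_id : String) (out : String × String) : Prop := out = parse_skill_markdown_py_alt text skill_id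
instance (text : String) (skill_id : String) (out : String × String) : Decidable (Spec_parse_skill_markdown_py text skill_id out) := by unfold Spec_parse_skill_markdown_py; infer_instance

-- ===== CLAIM (what is proved, stated in full; the proofs are below) =====
def Claim_equal_parse_skill_markdown_py : Prop := ∀ (text : String) (skill_id : String), Dom_parse_skill_markdown_py text skill_id → Spec_parse_skill_markdown_py text skill_id (parse_skill_markdown_py text skill_id)

-- ===== LEMMAS AND PROOFS =====

-- proof-side characterization: first heading line of a flat list of stripped lines
def pvBScan : List String → Option (String × List String)
  | [] => none
  | line :: rest =>
    if PySem.Str.startswith line "#" ∧ PySem.Str.strip (pvLstripHash line) ≠ "" then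
      some (PySem.Str.strip (pvLstripHash line), rest)
    else pvBScan rest

-- proof-side grouping over already-stripped lines, with the paragraphs accumulator pulled out
def pvGroup' : List String → List String → List (List String)
  | [], cur => if cur = [] then [] else [cur]
  | l :: rest, cur =>
    if l ≠ "" then pvGroup' rest (cur ++ [l])
    else if cur ≠ [] then cur :: pvGroup' rest []
    else pvGroup' rest cur

-- phase 3: title set, in_summary set: collect until the first blank (or the end)
theorem pvALoop_phase3 (ls : List String) (t : String) (acc : List String) (ht : t ≠ "") :
    pvALoop ls t acc true = (t, acc ++ (ls.map PySem.Str.strip).takeWhile (fun l => !(l == ""))) := by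
  induction ls generalizing acc with
  | nil => simp [pvALoop]
  | cons raw rest ih =>
    simp only [pvALoop, List.map_cons, List.takeWhile_cons]
    by_cases h : PySem.Str.strip raw = "" <;> simp [h, ht, ih]

-- phase 2: title set, in_summary not yet: skip blanks, then phase 3
theorem pvALoop_phase2 (ls : List String) (t : String) (ht : t ≠ "") :
    pvALoop ls t [] false =
      (t, ((ls.map PySem.Str.strip).dropWhile (· == "")).takeWhile (fun l => !(l == ""))) := by
  induction ls with
  | nil => simp [pvALoop]
  | cons raw rest ih =>
    simp only [pvALoop, List.map_cons, List.dropWhile_cons]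
    by_cases h : PySem.Str.strip raw = ""
    · simpa [h] using ih
    · simp [h, ht, pvALoop_phase3 rest t [PySem.Str.strip raw] ht]

-- phase 1: no title yet: A scans exactly as pvBScan does
theorem pvALoop_phase1 (ls : List String) :
    pvALoop ls "" [] false =
      match pvBScan (ls.map PySem.Str.strip) with
      | some (t, rest) => (t, (rest.dropWhile (· == "")).takeWhile (fun l => !(l == "")))
      | none => ("", []) := by
  induction ls with
  | nil => simp [pvALoop, pvBScan]
  | cons raw rest ih =>
    simp only [pvALoop, List.map_cons, pvBScan]
    by_cases h : PySem.Str.strip raw = ""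
    · have hs : PySem.Chars.startswith ([] : List Char) ['#'] = false := by decide
      have h' : (PySem.Str.strip raw).toList = [] := by simp [h]
      simp [h, PySem.Str.startswith, hs, ih]
    · by_cases hsw : PySem.Chars.startswith (PySem.Chars.strip raw.toList) ['#'] = true
      · by_cases ht : PySem.Str.strip (pvLstripHash (PySem.Str.strip raw)) = ""
        · simp [h, PySem.Str.startswith, hsw, ht, ih]
        · simp [h, PySem.Str.startswith, hsw, ht, pvALoop_phase2 rest _ ht]
      · simp [h, PySem.Str.startswith, hsw, ih]

-- membership: everything pvBScan returns as the rest was in the input list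
theorem pvBScan_rest_mem (ls : List String) {t : String} {rest : List String}
    (h : pvBScan ls = some (t, rest)) : ∀ x ∈ rest, x ∈ ls := by
  induction ls with
  | nil => simp [pvBScan] at h
  | cons l ls ih =>
    by_cases hc : PySem.Str.startswith l "#" ∧ PySem.Str.strip (pvLstripHash l) ≠ ""
    · simp only [pvBScan, if_pos hc, Option.some.injEq, Prod.mk.injEq] at h
      intro x hx; exact List.mem_cons_of_mem _ (h.2 ▸ hx)
    · simp only [pvBScan, if_neg hc] at h
      intro x hx; exact List.mem_cons_of_mem _ (ih h x hx)

theorem pvBScan_title_ne (ls : List String) {t : String} {rest : List String}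
    (h : pvBScan ls = some (t, rest)) : t ≠ "" := by
  induction ls with
  | nil => simp [pvBScan] at h
  | cons l ls ih =>
    by_cases hc : PySem.Str.startswith l "#" ∧ PySem.Str.strip (pvLstripHash l) ≠ ""
    · simp only [pvBScan, if_pos hc, Option.some.injEq, Prod.mk.injEq] at h
      exact h.1 ▸ hc.2
    · simp only [pvBScan, if_neg hc] at h
      exact ih h

-- ===== B-side lemmas =====

-- the port's grouping loop is pvGroup' on the stripped lines, paragraphs accumulator pulled out
theorem pvGroupLoop_eq (raws : List String) (paras : List (List String)) (cur : List String) :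
    pvGroupLoop raws paras cur = paras ++ pvGroup' (raws.map PySem.Str.strip) cur := by
  induction raws generalizing paras cur with
  | nil => by_cases h : cur = [] <;> simp [pvGroupLoop, pvGroup', h]
  | cons raw rest ih =>
    simp only [pvGroupLoop, List.map_cons, pvGroup']
    by_cases h : PySem.Str.strip raw = ""
    · by_cases hc : cur = []
      · simp [h, hc, ih]
      · simp [h, hc, ih]
    · simp [h, ih]

theorem pvSearchPara_append (xs ys : List String) :
    pvSearchPara (xs ++ ys) =
      match pvSearchPara xs with
      | some (t, r) => some (t, r ++ ys)
      | none => pvSearchPara ys := by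
  induction xs with
  | nil => simp [pvSearchPara]
  | cons l xs ih =>
    simp only [List.cons_append, pvSearchPara]
    by_cases hsw : PySem.Chars.startswith l.toList ['#'] = true
    · by_cases ht : PySem.Str.strip (pvLstripHash l) = "" <;>
        simp [PySem.Str.startswith, hsw, ht, ih]
    · simp [PySem.Str.startswith, hsw, ih]

-- head paragraph of a group with a nonempty open run
theorem pvGroup'_head (ls : List String) (cur : List String) (hc : cur ≠ []) :
    (pvGroup' ls cur).head? = some (cur ++ ls.takeWhile (fun l => !(l == ""))) := by
  induction ls generalizing cur with
  | nil => simp [pvGroup', hc]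
  | cons l rest ih =>
    simp only [pvGroup', List.takeWhile_cons]
    by_cases h : l = ""
    · simp [h, hc]
    · simpa [h, List.append_assoc] using ih (cur ++ [l]) (by simp)

-- first paragraph of a fresh group = first run of non-blank lines after leading blanks
theorem pvGroup'_head_nil (ls : List String) :
    (pvGroup' ls []).head?.getD [] =
      (ls.dropWhile (· == "")).takeWhile (fun l => !(l == "")) := by
  induction ls with
  | nil => simp [pvGroup']
  | cons l rest ih =>
    simp only [pvGroup', List.dropWhile_cons]
    by_cases h : l = ""
    · simpa [h] using ih
    · simp [h, pvGroup'_head rest [l] (by simp)]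

theorem pvSearchPara_nil_ne {cur : List String} {t : String} {tail : List String}
    (h : pvSearchPara cur = some (t, tail)) : cur ≠ [] := by
  intro hc; rw [hc] at h; simp [pvSearchPara] at h

-- title already found in the open run: the search result is the rest of the run,
-- or (if that is empty) the next paragraph
theorem pv_join_nil : PySem.Str.join " " ([] : List String) = "" := by decide

theorem pv_takeWhile_run (xs ys : List String) (h : ∀ x ∈ xs, x ≠ "") :
    (xs ++ "" :: ys).takeWhile (fun l => !(l == "")) = xs := by
  induction xs with
  | nil => simp
  | cons a tl ih =>
    have ha : a ≠ "" := h a (by simp)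
    simp [ha, ih (fun x hx => h x (List.mem_cons_of_mem _ hx))]

-- title already found in the open run: the search result is the rest of the run,
-- or (if that is empty) the next paragraph
theorem pvSearch_found (ls : List String) (cur : List String) (tt : String) (tail : List String)
    (h : pvSearchPara cur = some (tt, tail)) (htail : ∀ x ∈ tail, x ≠ "") :
    pvSearchParas (pvGroup' ls cur) =
      some (tt, PySem.Str.join " " (((tail ++ ls).dropWhile (· == "")).takeWhile (fun l => !(l == "")))) := by
  induction ls generalizing cur tail with
  | nil =>
    have hc := pvSearchPara_nil_ne h
    cases tail with
    | nil => simp [pvGroup', hc, pvSearchParas, h, pv_join_nil]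
    | cons a tl =>
      have ha : a ≠ "" := htail a (by simp)
      have hta : List.takeWhile (fun l => !(l == "")) tl = tl :=
        List.takeWhile_eq_self_iff.mpr
          (fun x hx => by simpa using htail x (List.mem_cons_of_mem _ hx))
      simp [pvGroup', hc, pvSearchParas, h, ha, hta]
  | cons l rest ih =>
    simp only [pvGroup']
    by_cases hl : l = ""
    · have hc := pvSearchPara_nil_ne h
      subst hl
      cases tail with
      | nil =>
        have hh := pvGroup'_head_nil rest
        cases hg : pvGroup' rest [] with
        | nil =>
          rw [hg] at hh
          simp only [List.head?_nil, Option.getD_none] at hh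
          simp [hc, pvSearchParas, h, ← hh, pv_join_nil]
        | cons p ps =>
          rw [hg] at hh
          simp only [List.head?_cons, Option.getD_some] at hh
          simp [hc, pvSearchParas, h, ← hh]
      | cons a tl =>
        have ha : a ≠ "" := htail a (by simp)
        have hta : List.takeWhile (fun l => !(l == "")) (tl ++ "" :: rest) = tl :=
          pv_takeWhile_run tl rest (fun x hx => htail x (List.mem_cons_of_mem _ hx))
        simp [hc, pvSearchParas, h, ha, hta]
    · have h' : pvSearchPara (cur ++ [l]) = some (tt, tail ++ [l]) := by
        rw [pvSearchPara_append, h]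
      have htail' : ∀ x ∈ tail ++ [l], x ≠ "" := by
        intro x hx
        rcases List.mem_append.1 hx with h1 | h1
        · exact htail x h1
        · simp at h1; subst h1; exact hl
      rw [if_pos hl, ih (cur ++ [l]) (tail ++ [l]) h' htail']
      simp [List.append_assoc]

-- no title yet (anywhere in the open run): the search result is pvBScan of the remaining lines
theorem pvSearch_notfound (ls : List String) (cur : List String)
    (h : pvSearchPara cur = none) :
    pvSearchParas (pvGroup' ls cur) =
      match pvBScan ls with
      | some (t, rest) =>
        some (t, PySem.Str.join " " ((rest.dropWhile (· == "")).takeWhile (fun l => !(l == ""))))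
      | none => none := by
  induction ls generalizing cur with
  | nil => by_cases hc : cur = [] <;> simp [pvGroup', hc, pvSearchParas, h, pvBScan]
  | cons l rest ih =>
    simp only [pvGroup', pvBScan]
    by_cases hl : l = ""
    · subst hl
      have hsw : PySem.Chars.startswith ([] : List Char) ['#'] = false := by decide
      by_cases hc : cur = []
      · subst hc; simp [hsw, ih [] h]
      · simp [hc, hsw, pvSearchParas, h, ih [] (by simp [pvSearchPara])]
    · by_cases hsw : PySem.Chars.startswith l.toList ['#'] = true
      · by_cases ht : PySem.Str.strip (pvLstripHash l) = ""
        · have h1 : pvSearchPara (cur ++ [l]) = none := by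
            rw [pvSearchPara_append, h]
            simp [pvSearchPara, PySem.Str.startswith, hsw, ht]
          simp [hl, PySem.Str.startswith, hsw, ht, ih (cur ++ [l]) h1]
        · have h1 : pvSearchPara (cur ++ [l]) = some (PySem.Str.strip (pvLstripHash l), []) := by
            rw [pvSearchPara_append, h]
            simp [pvSearchPara, PySem.Str.startswith, hsw, ht]
          rw [if_pos hl,
            pvSearch_found rest (cur ++ [l]) _ [] h1 (by simp)]
          simp [PySem.Str.startswith, hsw, ht]
      · have h1 : pvSearchPara (cur ++ [l]) = none := by
          rw [pvSearchPara_append, h]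
          simp [pvSearchPara, PySem.Str.startswith, hsw]
        simp [hl, PySem.Str.startswith, hsw, ih (cur ++ [l]) h1]

-- ===== strip/join no-op machinery (A strips the joined summary; the parts are stripped & nonempty) =====

theorem pv_fixed_head {p : Char → Bool} {c : Char} {l : List Char}
    (h : List.dropWhile p (c :: l) = c :: l) : p c = false := by
  by_cases hp : p c = true
  · exfalso
    rw [List.dropWhile_cons, if_pos hp] at h
    have := List.length_dropWhile_le p l
    have := congrArg List.length h
    simp at this; omega
  · simpa using hp

theorem pv_fixed_append {p : Char → Bool} {a : List Char} (x : List Char)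
    (ha : List.dropWhile p a = a) (hne : a ≠ []) :
    List.dropWhile p (a ++ x) = a ++ x := by
  cases a with
  | nil => exact absurd rfl hne
  | cons c l =>
    have hc := pv_fixed_head ha
    simp [hc]

def pvOk (cs : List Char) : Prop :=
  List.dropWhile PySem.Chars.isspace cs = cs ∧
  List.dropWhile PySem.Chars.isspace cs.reverse = cs.reverse

theorem pv_dropWhile_idem {p : Char → Bool} (l : List Char) :
    List.dropWhile p (List.dropWhile p l) = List.dropWhile p l := by
  induction l with
  | nil => simp
  | cons c l ih =>
    rw [List.dropWhile_cons]
    by_cases hp : p c = true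
    · simpa [hp] using ih
    · simp [hp]

theorem pv_fixed_prefix {p : Char → Bool} {y z : List Char}
    (hy : List.dropWhile p y = y) (hz : z <+: y) : List.dropWhile p z = z := by
  cases z with
  | nil => simp
  | cons c l =>
    obtain ⟨w, hw⟩ := hz
    rw [← hw, List.cons_append] at hy
    have hc := pv_fixed_head hy
    simp [hc]

theorem pvOk_strip (cs : List Char) : pvOk (PySem.Chars.strip cs) := by
  unfold PySem.Chars.strip PySem.Chars.rstrip PySem.Chars.lstrip
  constructor
  · apply pv_fixed_prefix (y := List.dropWhile PySem.Chars.isspace cs)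
    · exact pv_dropWhile_idem cs
    · rw [← List.reverse_suffix]
      simp only [List.reverse_reverse]
      exact List.dropWhile_suffix _
  · simp [List.reverse_reverse, pv_dropWhile_idem]

theorem pvOk_append_sep {a b : List Char} (ha : pvOk a) (hb : pvOk b)
    (hna : a ≠ []) (hnb : b ≠ []) : pvOk (a ++ ' ' :: b) := by
  constructor
  · exact pv_fixed_append _ ha.1 hna
  · have : (a ++ ' ' :: b).reverse = b.reverse ++ (' ' :: a.reverse) := by simp
    rw [this]
    have hr : b.reverse ≠ [] := by simpa using hnb
    exact pv_fixed_append (' ' :: a.reverse) hb.2 hr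

theorem pvOk_join (parts : List (List Char))
    (h : ∀ cs ∈ parts, pvOk cs ∧ cs ≠ []) :
    pvOk (PySem.Chars.join [' '] parts) ∧ (parts ≠ [] → PySem.Chars.join [' '] parts ≠ []) := by
  induction parts with
  | nil => exact ⟨⟨by simp [PySem.Chars.join_nil], by simp [PySem.Chars.join_nil]⟩, by simp⟩
  | cons p rest ih =>
    cases rest with
    | nil =>
      have := h p (by simp)
      exact ⟨by simpa [PySem.Chars.join_singleton] using this.1,
             fun _ => by simpa [PySem.Chars.join_singleton] using this.2⟩
    | cons q rest' =>
      have hp := h p (by simp)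
      have hrest := ih (fun cs hcs => h cs (List.mem_cons_of_mem _ hcs))
      have hjne : PySem.Chars.join [' '] (q :: rest') ≠ [] := hrest.2 (by simp)
      rw [PySem.Chars.join_cons_cons]
      have : p ++ [' '] ++ PySem.Chars.join [' '] (q :: rest') =
          p ++ ' ' :: PySem.Chars.join [' '] (q :: rest') := by simp
      rw [this]
      exact ⟨pvOk_append_sep hp.1 hrest.1 hp.2 hjne, fun _ => by simp⟩

theorem pv_strip_of_pvOk {cs : List Char} (h : pvOk cs) : PySem.Chars.strip cs = cs := by
  unfold PySem.Chars.strip PySem.Chars.rstrip PySem.Chars.lstrip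
  rw [h.1, h.2, List.reverse_reverse]

theorem pv_strip_join (body : List String)
    (h : ∀ x ∈ body, (∃ r, x = PySem.Str.strip r) ∧ x ≠ "") :
    PySem.Str.strip (PySem.Str.join " " body) = PySem.Str.join " " body := by
  unfold PySem.Str.strip PySem.Str.join
  congr 1
  rw [String.toList_ofList]
  have hsep : (" " : String).toList = [' '] := by decide
  rw [hsep]
  apply pv_strip_of_pvOk
  refine (pvOk_join (body.map String.toList) ?_).1
  intro cs hcs
  rw [List.mem_map] at hcs
  obtain ⟨x, hx, rfl⟩ := hcs
  obtain ⟨⟨r, hr⟩, hne⟩ := h x hx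
  constructor
  · rw [hr]; unfold PySem.Str.strip; rw [String.toList_ofList]; exact pvOk_strip _
  · intro hc
    exact hne (by
      have : x.toList = ("" : String).toList := by simpa using hc
      exact String.toList_injective this)

-- ===== VERDICT (by name: the statement is the Claim_ definition above) =====
theorem parse_skill_markdown_py_spec : Claim_equal_parse_skill_markdown_py := by
  intro text skill_id _
  unfold Spec_parse_skill_markdown_py parse_skill_markdown_py parse_skill_markdown_py_alt
  rw [pvALoop_phase1, pvGroupLoop_eq, List.nil_append,
    pvSearch_notfound _ [] (by simp [pvSearchPara])]
  cases hscan : pvBScan ((PySem.Str.splitlines text).map PySem.Str.strip) with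
  | none =>
    have h0 : PySem.Str.strip (PySem.Str.join " " []) = "" := by decide
    simp [h0]
  | some tr =>
    obtain ⟨t, rest⟩ := tr
    have ht : t ≠ "" := pvBScan_title_ne _ hscan
    have hbody : ∀ x ∈ (rest.dropWhile (· == "")).takeWhile (fun l => !(l == "")),
        (∃ r, x = PySem.Str.strip r) ∧ x ≠ "" := by
      intro x hx
      constructor
      · have h1 : x ∈ rest := by
          have h2 := (List.takeWhile_sublist (l := rest.dropWhile (· == ""))
            (fun l => !(l == ""))).mem hx
          exact (List.dropWhile_sublist (l := rest) (· == "")).mem h2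
        have h3 := pvBScan_rest_mem _ hscan x h1
        rw [List.mem_map] at h3
        obtain ⟨raw, _, hr⟩ := h3
        exact ⟨raw, hr.symm⟩
      · have := List.mem_takeWhile_imp hx
        simpa using this
    simp only [if_neg ht]
    exact Prod.ext rfl (pv_strip_join _ hbody)
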